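-- pv_equiv track=rewrite | github.com/louis-sanna-eki/AdventOfCode2021 | days/day20/solve.py | compute_number
-- ===== SOURCE A (Python) =====
-- def char_to_binary(char):
--     if char == ".":
--         return 0
--     if char == "#":
--         return 1
--     raise NotImplementedError
--
-- def get(image, y, x, default='.'):
--     if x < 0:
--         return default
--     if y < 0:
--         return default
--     if y >= len(image):
--         return default
--     if x >= len(image[y]):
--         return default
--     return image[y][x]
--
-- def compute_number(image, y, x, default):
--     result = 0
--     multiple = 8
--     for delta_y in [-1, 0, 1]:
--         for delta_x in [-1, 0, 1]:
--             char = get(image, y + delta_y, x + delta_x, default)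
--             binary = char_to_binary(char)
--             result += binary * 2**multiple
--             multiple -= 1
--     return int(result)
-- ===== SOURCE B (Python) =====
-- def compute_number(image, y, x, default):
--     rows = []
--     for yy in (y - 1, y, y + 1):
--         row = image[yy] if 0 <= yy < len(image) else ""
--         if x + 1 >= 0:
--             lo = max(x - 1, 0)
--             seg = row[lo:x + 2]
--             pad_left = lo - (x - 1)
--         else:
--             seg = ""
--             pad_left = 3
--         rows.append(default * pad_left + seg + default * (3 - pad_left - len(seg)))
--     window = "".join(rows)
--     bits = "".join("1" if c == "#" else "0" if c == "." else c for c in window)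
--     return int(bits, 2)
-- ===== Notes on version B (the rewrite author's own statement) =====
-- stated objective: alternative
-- what changed: B replaces A's nine per-cell get/char_to_binary calls with a weighted power-of-two sum by a staged pipeline: each of the three window rows is extracted at once by string slicing with computed default-padding, the three rows are joined into one window string, mapped to '0'/'1' characters, and the result is a single base-2 int() parse.
import Mathlib
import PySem

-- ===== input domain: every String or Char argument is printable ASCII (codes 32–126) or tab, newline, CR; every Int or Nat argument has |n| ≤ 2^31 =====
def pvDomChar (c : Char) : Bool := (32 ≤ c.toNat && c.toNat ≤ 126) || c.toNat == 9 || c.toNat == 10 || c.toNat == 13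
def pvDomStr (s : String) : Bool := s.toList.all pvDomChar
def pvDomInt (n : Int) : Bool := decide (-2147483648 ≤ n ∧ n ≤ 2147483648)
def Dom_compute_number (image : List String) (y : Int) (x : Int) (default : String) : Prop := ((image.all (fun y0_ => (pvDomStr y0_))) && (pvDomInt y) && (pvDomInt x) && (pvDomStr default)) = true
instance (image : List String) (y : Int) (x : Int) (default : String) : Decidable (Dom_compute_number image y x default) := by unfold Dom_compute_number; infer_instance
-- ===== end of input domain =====

-- B extracts each window row in one string-slice with computed default padding, joins the three
-- rows, maps the characters to '0'/'1' and does a single base-2 parse, instead of A's nine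
-- per-cell get / char_to_binary calls with a weighted power-of-two sum; objective: alternative.

-- ===== PORT A =====
-- char_to_binary: none = the Python NotImplementedError (excluded by Pre_).
def char_to_binary (char : String) : Option Int :=
  if char = "." then some 0
  else if char = "#" then some 1
  else none

-- get: the bound checks make the final indexing in-range, so the .getD "" defaults never fire.
def getA (image : List String) (y : Int) (x : Int) (default : String) : String :=
  if x < 0 then default
  else if y < 0 then default
  else if (image.length : Int) ≤ y then default
  else if PySem.Str.len ((PySem.List.pyGet? image y).getD "") ≤ x then default
  else ((PySem.Str.pyGet? ((PySem.List.pyGet? image y).getD "") x).map String.singleton).getD ""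

-- state = (result, multiple); none once char_to_binary raised.  multiple is ≥ 0 whenever 2**multiple
-- is evaluated (8 down to 0), so the .toNat in the exponent is exact.
def compute_number (image : List String) (y : Int) (x : Int) (default : String) : Int :=
  let st := List.foldl (fun st dy =>
      List.foldl (fun st dx =>
          st.bind (fun rm : Int × Int =>
            (char_to_binary (getA image (y + dy) (x + dx) default)).map
              (fun b => (rm.1 + b * 2 ^ (rm.2).toNat, rm.2 - 1))))
        st [(-1 : Int), 0, 1])
    (some ((0 : Int), (8 : Int))) [(-1 : Int), 0, 1]
  (st.map Prod.fst).getD 0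

-- ===== PORT B =====
-- Python's 'default * n' (string repetition; n ≤ 0 gives "")
def strTimes (s : List Char) (n : Int) : List Char := (List.replicate n.toNat s).flatten

-- one iteration of B's row loop: the 3-character window row at line yy, via slice + padding
def rowOf (image : List String) (x : Int) (default : String) (yy : Int) : List Char :=
  let row : List Char :=
    if 0 ≤ yy ∧ yy < (image.length : Int)
    then ((PySem.List.pyGet? image yy).getD "").toList else []
  if 0 ≤ x + 1 then
    let lo := max (x - 1) 0
    let seg := PySem.List.slice row (some lo) (some (x + 2))
    strTimes default.toList (lo - (x - 1)) ++ seg ++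
      strTimes default.toList (3 - (lo - (x - 1)) - (seg.length : Int))
  else
    strTimes default.toList 3 ++ [] ++ strTimes default.toList (3 - 3 - 0)

-- "".join of the three rows (empty separator = flatten), per-char translation, single int(bits, 2)
-- parse; unknown chars pass through untranslated, so int() = ofCharsBase? gives the Python
-- ValueError there = none (outside Pre_), .getD 0 arbitrary there.
def compute_number_alt (image : List String) (y : Int) (x : Int) (default : String) : Int :=
  let window := ([y - 1, y, y + 1].map (rowOf image x default)).flatten
  let bits := window.map (fun c => if c = '#' then '1' else if c = '.' then '0' else c)
  (PySem.Int.ofCharsBase? bits 2).getD 0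

-- ===== PRECONDITION & SPEC =====
-- the character the window reads at (yy, xx): the in-range cell, else the default
def pvNb (image : List String) (yy : Int) (xx : Int) (default : String) : String :=
  if 0 ≤ yy ∧ yy < (image.length : Int) ∧ 0 ≤ xx ∧
      xx < PySem.Str.len ((PySem.List.pyGet? image yy).getD "") then
    ((PySem.Str.pyGet? ((PySem.List.pyGet? image yy).getD "") xx).map String.singleton).getD ""
  else default

-- Pre_ excludes exactly the inputs on which Python A raises NotImplementedError: some cell of the
-- 3x3 window at (y, x) (or the default, when the window leaves the image) is neither "." nor "#".
def Pre_compute_number (image : List String) (y : Int) (x : Int) (default : String) : Prop :=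
  ∀ dy ∈ [(-1 : Int), 0, 1], ∀ dx ∈ [(-1 : Int), 0, 1],
    pvNb image (y + dy) (x + dx) default = "." ∨ pvNb image (y + dy) (x + dx) default = "#"
instance (image : List String) (y : Int) (x : Int) (default : String) : Decidable (Pre_compute_number image y x default) := by unfold Pre_compute_number; infer_instance

def pvWitness_compute_number : List String × Int × Int × String := (["#.", ".#"], 0, 0, ".")

def Spec_compute_number (image : List String) (y : Int) (x : Int) (default : String) (out : Int) : Prop := out = compute_number_alt image y x default
instance (image : List String) (y : Int) (x : Int) (default : String) (out : Int) : Decidable (Spec_compute_number image y x default out) := by unfold Spec_compute_number; infer_instance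

-- ===== CLAIM (what is proved, stated in full; the proofs are below) =====
def Claim_equal_compute_number : Prop := ∀ (image : List String) (y : Int) (x : Int) (default : String), Dom_compute_number image y x default → Pre_compute_number image y x default → Spec_compute_number image y x default (compute_number image y x default)

-- ===== LEMMAS AND PROOFS =====

-- A's get (early-return bound checks) reads the same character as pvNb
theorem getA_eq_pvNb (image : List String) (y x : Int) (default : String) :
    getA image y x default = pvNb image y x default := by
  unfold getA pvNb
  split_ifs <;> first | rfl | omega

-- char-level neighbour: cell of `row` at index i, else the default characters
def nbL (row d : List Char) (i : Int) : List Char :=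
  if 0 ≤ i ∧ i < (row.length : Int) then [row.getD i.toNat ' '] else d

theorem nbL_neg (row d : List Char) (i : Int) (h : i < 0) : nbL row d i = d := by
  unfold nbL; rw [if_neg]; omega

theorem nbL_drop (row d : List Char) (j : Nat) (k : Int) (hk : 0 ≤ k) :
    nbL row d ((j : Int) + k) = nbL (row.drop j) d k := by
  unfold nbL
  have hlen : ((row.drop j).length : Int) = (row.length : Int) - min (j:Int) (row.length:Int) := by
    simp [List.length_drop]; omega
  by_cases hc : 0 ≤ k ∧ k < ((row.drop j).length : Int)
  · rw [if_pos hc, if_pos (by omega)]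
    have hj : j + k.toNat < row.length := by omega
    have : ((j:Int) + k).toNat = j + k.toNat := by omega
    rw [this]
    rw [List.getD_eq_getElem _ _ hj, List.getD_eq_getElem _ _ (by simp [List.length_drop]; omega)]
    simp [List.getElem_drop]
  · rw [if_neg hc, if_neg (by omega)]

theorem take1_pad (t d : List Char) :
    t.take 1 ++ strTimes d (1 - ((t.take 1).length : Int)) = nbL t d 0 := by
  match t with
  | [] => simp [strTimes, nbL]
  | a :: r => simp [strTimes, nbL]

theorem take2_pad (t d : List Char) :
    t.take 2 ++ strTimes d (2 - ((t.take 2).length : Int)) = nbL t d 0 ++ nbL t d 1 := by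
  match t with
  | [] => simp [strTimes, nbL]
  | [a] => simp [strTimes, nbL]
  | a :: b :: r =>
    have h0 : (0:Int) ≤ (r.length:Int) + 1 := by omega
    have h2 : (1:Int) < (r.length:Int) + 1 + 1 := by omega
    simp [strTimes, nbL, h0, h2]

theorem take3_pad (t d : List Char) :
    t.take 3 ++ strTimes d (3 - ((t.take 3).length : Int)) =
      nbL t d 0 ++ nbL t d 1 ++ nbL t d 2 := by
  match t with
  | [] => simp [strTimes, nbL]
  | [a] => simp [strTimes, nbL]
  | [a, b] => simp [strTimes, nbL]
  | a :: b :: c :: r =>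
    have h1 : (0:Int) ≤ (r.length:Int) + 1 + 1 := by omega
    have h2 : (0:Int) ≤ (r.length:Int) + 1 := by omega
    have h3 : (2:Int) ≤ (r.length:Int) + 1 + 1 := by omega
    simp [strTimes, nbL, h1, h2, h3]

-- B's sliced-and-padded row equals the three neighbour cells, unconditionally
theorem row_eq_cells (row d : List Char) (x : Int) :
    (if 0 ≤ x + 1 then
      strTimes d (max (x - 1) 0 - (x - 1)) ++ PySem.List.slice row (some (max (x - 1) 0)) (some (x + 2)) ++
        strTimes d (3 - (max (x - 1) 0 - (x - 1)) - ((PySem.List.slice row (some (max (x - 1) 0)) (some (x + 2))).length : Int))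
     else strTimes d 3 ++ [] ++ strTimes d (3 - 3 - 0))
      = nbL row d (x - 1) ++ nbL row d x ++ nbL row d (x + 1) := by
  by_cases hx : 0 ≤ x + 1
  · rw [if_pos hx]
    rcases lt_trichotomy x 1 with hx1 | hx1 | hx1
    · -- x = -1 or x = 0
      have hlb : -1 ≤ x := by omega
      have hub : x ≤ 0 := by omega
      interval_cases x
      · -- x = -1
        have hmax : max ((-1:Int) - 1) 0 = 0 := by omega
        rw [hmax]
        rw [PySem.List.slice_zero_start row _, PySem.List.slice_to row (by omega)]
        have : ((-1:Int) + 2).toNat = 1 := by omega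
        rw [this]
        rw [nbL_neg row d ((-1:Int) - 1) (by omega), nbL_neg row d (-1) (by omega)]
        have hT : strTimes d (0 - ((-1:Int) - 1)) = d ++ d := by simp [strTimes]
        rw [hT]
        have := take1_pad row d
        have harith : (3 - (0 - ((-1:Int) - 1)) - ((row.take 1).length : Int)) = 1 - ((row.take 1).length : Int) := by ring
        rw [harith, List.append_assoc, this]
        norm_num
      · -- x = 0
        have hmax : max ((0:Int) - 1) 0 = 0 := by omega
        rw [hmax]
        rw [PySem.List.slice_zero_start row _, PySem.List.slice_to row (by omega)]
        have : ((0:Int) + 2).toNat = 2 := by omega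
        rw [this]
        rw [nbL_neg row d ((0:Int) - 1) (by omega)]
        have hT : strTimes d (0 - ((0:Int) - 1)) = d := by simp [strTimes]
        rw [hT]
        have harith : (3 - (0 - ((0:Int) - 1)) - ((row.take 2).length : Int)) = 2 - ((row.take 2).length : Int) := by ring
        rw [harith, List.append_assoc, take2_pad row d]
        norm_num
    · -- x = 1
      subst hx1
      have hmax : max ((1:Int) - 1) 0 = 0 := by omega
      rw [hmax]
      rw [PySem.List.slice_zero_start row _, PySem.List.slice_to row (by omega)]
      have : ((1:Int) + 2).toNat = 3 := by omega
      rw [this]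
      have hT : strTimes d (0 - ((1:Int) - 1)) = [] := by simp [strTimes]
      rw [hT]
      have harith : (3 - (0 - ((1:Int) - 1)) - ((row.take 3).length : Int)) = 3 - ((row.take 3).length : Int) := by ring
      rw [harith]
      have h3 := take3_pad row d
      simp only [List.nil_append]
      rw [h3]
      norm_num
    · -- 1 < x
      have hmax : max (x - 1) 0 = x - 1 := by omega
      rw [hmax]
      have hT : strTimes d (x - 1 - (x - 1)) = [] := by simp [strTimes]
      rw [hT]
      rw [PySem.List.slice_toNat _ (by omega) (by omega)]
      have hnv : (x + 2).toNat - (x - 1).toNat = 3 := by omega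
      rw [hnv]
      have harith : (3 - (x - 1 - (x - 1)) - (((row.drop (x-1).toNat).take 3).length : Int)) = 3 - (((row.drop (x-1).toNat).take 3).length : Int) := by ring
      rw [harith]
      simp only [List.nil_append]
      rw [take3_pad (row.drop (x-1).toNat) d]
      rw [show x - 1 = (((x-1).toNat : Nat):Int) + 0 by omega, nbL_drop row d (x-1).toNat 0 le_rfl]
      rw [show x = (((x-1).toNat : Nat):Int) + 1 by omega, nbL_drop row d (x-1).toNat 1 (by omega)]
      rw [show (((x-1).toNat : Nat):Int) + 1 + 1 = (((x-1).toNat : Nat):Int) + 2 by ring, nbL_drop row d (x-1).toNat 2 (by omega)]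
      simp
  · rw [if_neg hx]
    rw [nbL_neg row d (x - 1) (by omega), nbL_neg row d x (by omega), nbL_neg row d (x + 1) (by omega)]
    simp [strTimes]

-- pvNb at string level = nbL at char level on rowOf's row list
theorem pvNb_toList (image : List String) (yy xx : Int) (default : String) :
    (pvNb image yy xx default).toList =
      nbL (if 0 ≤ yy ∧ yy < (image.length : Int)
           then ((PySem.List.pyGet? image yy).getD "").toList else []) default.toList xx := by
  unfold pvNb nbL
  by_cases hy : 0 ≤ yy ∧ yy < (image.length : Int)
  · rw [if_pos hy]
    set s := ((PySem.List.pyGet? image yy).getD "") with hs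
    by_cases hx : 0 ≤ xx ∧ xx < (s.toList.length : Int)
    · rw [if_pos ⟨hy.1, hy.2, hx.1, by rw [PySem.Str.len_eq]; exact hx.2⟩, if_pos hx]
      have hg : PySem.Str.pyGet? s xx = some (s.toList[xx.toNat]'(by omega)) := by
        have : PySem.Str.pyGet? s xx = PySem.List.pyGet? s.toList xx := by
          simp [PySem.Str.pyGet?_eq]
        rw [this, PySem.List.pyGet?_eq_some_getElem _ hx.1 (by exact_mod_cast hx.2)]
      rw [hg]
      simp [String.singleton]
      rw [List.getElem?_eq_getElem (show xx.toNat < s.toList.length by omega)]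
      rfl
    · rw [if_neg (by rw [PySem.Str.len_eq]; tauto), if_neg hx]
  · rw [if_neg hy, if_neg (by tauto), if_neg (by simp)]

-- rowOf in terms of pvNb
theorem rowOf_eq (image : List String) (x : Int) (default : String) (yy : Int) :
    rowOf image x default yy =
      (pvNb image yy (x - 1) default).toList ++ (pvNb image yy x default).toList ++
        (pvNb image yy (x + 1) default).toList := by
  rw [pvNb_toList, pvNb_toList, pvNb_toList]
  exact row_eq_cells _ _ x

-- the closed 9-cell fact: A's weighted fold = B's parse, for any window of "."/"#" cells
theorem nine_cells (s0 s1 s2 s3 s4 s5 s6 s7 s8 : String)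
    (h0 : s0 = "." ∨ s0 = "#") (h1 : s1 = "." ∨ s1 = "#") (h2 : s2 = "." ∨ s2 = "#")
    (h3 : s3 = "." ∨ s3 = "#") (h4 : s4 = "." ∨ s4 = "#") (h5 : s5 = "." ∨ s5 = "#")
    (h6 : s6 = "." ∨ s6 = "#") (h7 : s7 = "." ∨ s7 = "#") (h8 : s8 = "." ∨ s8 = "#") :
    ((List.foldl (fun st c =>
        st.bind (fun rm : Int × Int =>
          (char_to_binary c).map (fun b => (rm.1 + b * 2 ^ (rm.2).toNat, rm.2 - 1))))
      (some ((0 : Int), (8 : Int))) [s0, s1, s2, s3, s4, s5, s6, s7, s8]).map Prod.fst).getD 0 =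
    (PySem.Int.ofCharsBase?
      (((s0.toList ++ s1.toList ++ s2.toList) ++ (s3.toList ++ s4.toList ++ s5.toList) ++
        (s6.toList ++ s7.toList ++ s8.toList)).map (fun c => if c = '#' then '1' else if c = '.' then '0' else c)) 2).getD 0 := by
  rcases h0 with h0 | h0 <;> rcases h1 with h1 | h1 <;> rcases h2 with h2 | h2 <;>
    rcases h3 with h3 | h3 <;> rcases h4 with h4 | h4 <;> rcases h5 with h5 | h5 <;>
    rcases h6 with h6 | h6 <;> rcases h7 with h7 | h7 <;> rcases h8 with h8 | h8 <;>
    subst h0 h1 h2 h3 h4 h5 h6 h7 h8 <;> decide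

-- ===== VERDICT (by name: the statement is the Claim_ definition above) =====
theorem compute_number_spec : Claim_equal_compute_number := by
  intro image y x default _ hpre
  have e : ∀ a : Int, a + -1 = a - 1 := fun a => by ring
  have e0 : ∀ a : Int, a + 0 = a := fun a => by ring
  have h0 := hpre (-1) (by simp) (-1) (by simp)
  have h1 := hpre (-1) (by simp) 0 (by simp)
  have h2 := hpre (-1) (by simp) 1 (by simp)
  have h3 := hpre 0 (by simp) (-1) (by simp)
  have h4 := hpre 0 (by simp) 0 (by simp)
  have h5 := hpre 0 (by simp) 1 (by simp)
  have h6 := hpre 1 (by simp) (-1) (by simp)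
  have h7 := hpre 1 (by simp) 0 (by simp)
  have h8 := hpre 1 (by simp) 1 (by simp)
  simp only [e, e0] at h0 h1 h2 h3 h4 h5 h6 h7 h8
  unfold Spec_compute_number compute_number compute_number_alt
  simp only [List.map_cons, List.map_nil, List.flatten_cons, List.flatten_nil, List.append_nil]
  rw [rowOf_eq, rowOf_eq, rowOf_eq]
  simp only [List.foldl_cons, List.foldl_nil, getA_eq_pvNb, e, e0]
  have key := nine_cells _ _ _ _ _ _ _ _ _ h0 h1 h2 h3 h4 h5 h6 h7 h8
  simp only [List.foldl_cons, List.foldl_nil] at key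
  simp only [List.append_assoc] at key ⊢
  exact key
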